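-- pv_equiv track=rewrite | github.com/take365/CraftMind | src/cad/minimal_dxf.py | _collect_header_values
-- ===== SOURCE A (Python) =====
-- def _collect_header_values(pairs: list[tuple[str, str]]) -> dict[str, list[str]]:
--     header: dict[str, list[str]] = {}
--     current_var: str | None = None
--     in_header = False
--     for raw_code, raw_value in pairs:
--         code = raw_code.strip()
--         value = raw_value.strip()
--         if code == "0" and value == "SECTION":
--             continue
--         if code == "2" and value == "HEADER":
--             in_header = True
--             continue
--         if in_header and code == "0" and value == "ENDSEC":
--             break
--         if not in_header:
--             continue
--         if code == "9":
--             current_var = value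
--             header[current_var] = []
--             continue
--         if current_var is not None:
--             header[current_var].append(value)
--     return header
-- ===== SOURCE B (Python) =====
-- def _collect_header_values(pairs: list[tuple[str, str]]) -> dict[str, list[str]]:
--     stripped = [(c.strip(), v.strip()) for c, v in pairs]
--     if ("2", "HEADER") not in stripped:
--         return {}
--     rest = stripped[stripped.index(("2", "HEADER")) + 1:]
--     region = rest[:rest.index(("0", "ENDSEC"))] if ("0", "ENDSEC") in rest else rest
--     header: dict[str, list[str]] = {}
--     current: str | None = None
--     for c, v in region:
--         if (c, v) in (("0", "SECTION"), ("2", "HEADER")):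
--             continue
--         if c == "9":
--             current = v
--             header[current] = []
--         elif current is not None:
--             header[current].append(v)
--     return header
-- ===== Notes on version B (the rewrite author's own statement) =====
-- stated objective: alternative
-- what changed: A's single incremental scan with carried in_header/break state is replaced by a locate-then-group decomposition: strip all pairs once, slice out the region between the first ('2','HEADER') and the first following ('0','ENDSEC') with index/slicing, then group that region into the dict.
import Mathlib
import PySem

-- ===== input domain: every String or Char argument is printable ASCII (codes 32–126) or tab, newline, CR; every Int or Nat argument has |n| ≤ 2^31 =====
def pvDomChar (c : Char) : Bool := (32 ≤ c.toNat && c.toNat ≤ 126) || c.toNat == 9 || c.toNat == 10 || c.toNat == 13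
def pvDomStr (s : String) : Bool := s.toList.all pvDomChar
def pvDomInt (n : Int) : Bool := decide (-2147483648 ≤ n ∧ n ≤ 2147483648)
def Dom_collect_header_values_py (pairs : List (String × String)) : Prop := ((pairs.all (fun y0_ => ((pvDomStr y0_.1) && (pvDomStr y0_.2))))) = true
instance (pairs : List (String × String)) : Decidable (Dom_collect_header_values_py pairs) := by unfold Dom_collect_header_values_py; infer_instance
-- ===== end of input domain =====

-- B re-decomposes A's single stateful scan as locate-then-group (find the HEADER/ENDSEC region first,
-- then group the pre-stripped region); same return value, objective: alternative decomposition.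

-- ===== PORT A =====
-- A's loop with break, carried state (header dict, current_var, in_header); strips inside the loop.
def pvGoA : List (String × String) → PySem.Dict String (List String) → Option String → Bool → PySem.Dict String (List String)
  | [], header, _, _ => header
  | (rawCode, rawValue) :: rest, header, currentVar, inHeader =>
    let code := PySem.Str.strip rawCode
    let value := PySem.Str.strip rawValue
    if code = "0" ∧ value = "SECTION" then
      pvGoA rest header currentVar inHeader
    else if code = "2" ∧ value = "HEADER" then
      pvGoA rest header currentVar true
    else if inHeader ∧ code = "0" ∧ value = "ENDSEC" then
      header
    else if ¬ inHeader then
      pvGoA rest header currentVar inHeader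
    else if code = "9" then
      pvGoA rest (header.insert value []) (some value) inHeader
    else
      match currentVar with
      | some k => pvGoA rest (header.modify k [] (· ++ [value])) currentVar inHeader
      | none => pvGoA rest header currentVar inHeader

def collect_header_values_py (pairs : List (String × String)) : List (String × List String) :=
  (pvGoA pairs PySem.Dict.empty none false).items

-- ===== PORT B =====
-- group pass over the already-stripped header region
def pvGroupB : List (String × String) → PySem.Dict String (List String) → Option String → PySem.Dict String (List String)
  | [], header, _ => header
  | (c, v) :: rest, header, current =>
    if (c, v) = ("0", "SECTION") ∨ (c, v) = ("2", "HEADER") then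
      pvGroupB rest header current
    else if c = "9" then
      pvGroupB rest (header.insert v []) (some v)
    else
      match current with
      | some k => pvGroupB rest (header.modify k [] (· ++ [v])) current
      | none => pvGroupB rest header current

def collect_header_values_py_alt (pairs : List (String × String)) : List (String × List String) :=
  let stripped := pairs.map (fun p => (PySem.Str.strip p.1, PySem.Str.strip p.2))
  match PySem.List.index? stripped ("2", "HEADER") with
  | none => []
  | some i =>
    let rest := stripped.drop (i + 1)
    let region :=
      match PySem.List.index? rest ("0", "ENDSEC") with
      | some e => rest.take e
      | none => rest
    (pvGroupB region PySem.Dict.empty none).items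

-- ===== PRECONDITION & SPEC =====
def Spec_collect_header_values_py (pairs : List (String × String)) (out : List (String × List String)) : Prop := out = collect_header_values_py_alt pairs
instance (pairs : List (String × String)) (out : List (String × List String)) : Decidable (Spec_collect_header_values_py pairs out) := by unfold Spec_collect_header_values_py; infer_instance

-- ===== CLAIM (what is proved, stated in full; the proofs are below) =====
def Claim_equal_collect_header_values_py : Prop := ∀ (pairs : List (String × String)), Dom_collect_header_values_py pairs → Spec_collect_header_values_py pairs (collect_header_values_py pairs)

-- ===== LEMMAS AND PROOFS =====

-- the "cut before the first ENDSEC" part of B, as a function we can reason about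
def pvCut (l : List (String × String)) : List (String × String) :=
  match PySem.List.index? l ("0", "ENDSEC") with
  | some e => l.take e
  | none => l

theorem pvCut_cons (p : String × String) (t : List (String × String)) :
    pvCut (p :: t) = if p = ("0", "ENDSEC") then [] else p :: pvCut t := by
  unfold pvCut
  by_cases hp : p = ("0", "ENDSEC")
  · subst hp
    rw [PySem.List.index?_cons_self]
    simp
  · rw [PySem.List.index?_cons_of_ne t hp]
    cases h : PySem.List.index? t ("0", "ENDSEC") with
    | none => simp [hp]
    | some e => simp [hp, List.take_succ_cons]

-- inside the header, A's break-at-ENDSEC loop is B's group pass over the cut, stripped remainder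
theorem pvGoA_true_eq (l : List (String × String)) :
    ∀ (d : PySem.Dict String (List String)) (cur : Option String),
      pvGoA l d cur true
        = pvGroupB (pvCut (l.map (fun p => (PySem.Str.strip p.1, PySem.Str.strip p.2)))) d cur := by
  induction l with
  | nil => intro d cur; rfl
  | cons p t ih =>
    intro d cur
    obtain ⟨rc, rv⟩ := p
    simp only [List.map_cons]
    rw [pvCut_cons]
    set c := PySem.Str.strip rc with hc
    set v := PySem.Str.strip rv with hv
    by_cases hE : (c, v) = (("0", "ENDSEC") : String × String)
    · have hc0 : c = "0" := congrArg Prod.fst hE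
      have hv0 : v = "ENDSEC" := congrArg Prod.snd hE
      simp [pvGoA, pvGroupB, hc0, hv0, ← hc, ← hv]
    · rw [if_neg hE]
      by_cases hS : c = "0" ∧ v = "SECTION"
      · simp [pvGoA, pvGroupB, ← hc, ← hv, hS, Prod.ext_iff, ih]
      · by_cases hH : c = "2" ∧ v = "HEADER"
        · obtain ⟨h2, hHd⟩ := hH
          rw [h2, hHd]
          simp [pvGoA, pvGroupB, ← hc, ← hv, h2, hHd, ih]
        · have hnE : ¬ (c = "0" ∧ v = "ENDSEC") := by
            intro h; exact hE (by simp [h.1, h.2])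
          by_cases h9 : c = "9"
          · simp [pvGoA, pvGroupB, ← hc, ← hv, h9, Prod.ext_iff, ih]
          · cases cur with
            | some k => simp [pvGoA, pvGroupB, ← hc, ← hv, hS, hH, hnE, h9, Prod.ext_iff, ih]
            | none => simp [pvGoA, pvGroupB, ← hc, ← hv, hS, hH, hnE, h9, Prod.ext_iff, ih]

-- before the header, A skips everything up to the first (2, HEADER) line
theorem pvGoA_false_eq (l : List (String × String)) :
    ∀ (d : PySem.Dict String (List String)) (cur : Option String),
      pvGoA l d cur false
        = match PySem.List.index? (l.map (fun p => (PySem.Str.strip p.1, PySem.Str.strip p.2))) ("2", "HEADER") with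
          | none => d
          | some i => pvGoA (l.drop (i + 1)) d cur true := by
  induction l with
  | nil => intro d cur; rfl
  | cons p t ih =>
    intro d cur
    obtain ⟨rc, rv⟩ := p
    simp only [List.map_cons]
    set c := PySem.Str.strip rc with hc
    set v := PySem.Str.strip rv with hv
    by_cases hH : (c, v) = (("2", "HEADER") : String × String)
    · have h2 : c = "2" := congrArg Prod.fst hH
      have hHd : v = "HEADER" := congrArg Prod.snd hH
      rw [hH, PySem.List.index?_cons_self]
      by_cases hS : c = "0" ∧ v = "SECTION"
      · exact absurd h2 (by simp [hS.1])
      · simp [pvGoA, ← hc, ← hv, h2, hHd, List.drop]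
    · rw [PySem.List.index?_cons_of_ne (t.map (fun p => (PySem.Str.strip p.1, PySem.Str.strip p.2))) hH]
      have step : pvGoA ((rc, rv) :: t) d cur false = pvGoA t d cur false := by
        by_cases hS : c = "0" ∧ v = "SECTION"
        · simp [pvGoA, ← hc, ← hv, hS]
        · have hH' : ¬ (c = "2" ∧ v = "HEADER") := by
            intro h; exact hH (by simp [h.1, h.2])
          simp [pvGoA, ← hc, ← hv, hS, hH']
      rw [step, ih d cur]
      cases h : PySem.List.index? (t.map (fun p => (PySem.Str.strip p.1, PySem.Str.strip p.2))) ("2", "HEADER") with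
      | none => simp
      | some i => simp [List.drop_succ_cons]

-- ===== VERDICT (by name: the statement is the Claim_ definition above) =====
theorem collect_header_values_py_spec : Claim_equal_collect_header_values_py := by
  intro pairs _
  unfold Spec_collect_header_values_py collect_header_values_py collect_header_values_py_alt
  rw [pvGoA_false_eq]
  cases h : PySem.List.index? (pairs.map (fun p => (PySem.Str.strip p.1, PySem.Str.strip p.2))) ("2", "HEADER") with
  | none => simp only [h]; rfl
  | some i =>
    simp only [h]
    rw [pvGoA_true_eq, List.map_drop]
    rfl
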